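-- pv_equiv track=rewrite | github.com/larpcomboss/gr1ms-cracked-tools | meowc2.py | normalize_method
-- ===== SOURCE A (Python) =====
-- ALIAS_MAP = {
--     "tcp": ["tcp", "tcpbypass", "tcp-bypass", "tcp_bypass", "tcpbyp", "tcpbypass", "tlsvip"],
--     "udp": ["udp", "udpbypass", "udp-bypass", "udp_bypass", "udp-ovh", "udpbypss","udpovh"],
--     "syn": ["syn", "synflood", "syn-flood"],
--     "curl": ["curl", "http", "http-get", "curlget","Skycurl"],
-- }
--
-- def normalize_method(raw_choice: str):
--     if not isinstance(raw_choice, str):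
--         return None
--     c = raw_choice.strip().lower()
--     for canonical, aliases in ALIAS_MAP.items():
--         if c in [a.lower() for a in aliases]:
--             return canonical
--     return None
-- ===== SOURCE B (Python) =====
-- ALIAS_MAP = {
--     "tcp": ["tcp", "tcpbypass", "tcp-bypass", "tcp_bypass", "tcpbyp", "tcpbypass", "tlsvip"],
--     "udp": ["udp", "udpbypass", "udp-bypass", "udp_bypass", "udp-ovh", "udpbypss","udpovh"],
--     "syn": ["syn", "synflood", "syn-flood"],
--     "curl": ["curl", "http", "http-get", "curlget","Skycurl"],
-- }
--
-- _REVERSE = {}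
-- for _canonical, _aliases in ALIAS_MAP.items():
--     for _a in _aliases:
--         _REVERSE.setdefault(_a.lower(), _canonical)
--
-- def normalize_method(raw_choice: str):
--     if not isinstance(raw_choice, str):
--         return None
--     return _REVERSE.get(raw_choice.strip().lower())
-- ===== Notes on version B (the rewrite author's own statement) =====
-- stated objective: idiomatic
-- what changed: Replaced the per-call scan over ALIAS_MAP with per-alias lowercase list comprehensions by a module-level reverse lookup dict built once with first-wins setdefault, so normalize_method is a single dict .get().
import Mathlib
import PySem

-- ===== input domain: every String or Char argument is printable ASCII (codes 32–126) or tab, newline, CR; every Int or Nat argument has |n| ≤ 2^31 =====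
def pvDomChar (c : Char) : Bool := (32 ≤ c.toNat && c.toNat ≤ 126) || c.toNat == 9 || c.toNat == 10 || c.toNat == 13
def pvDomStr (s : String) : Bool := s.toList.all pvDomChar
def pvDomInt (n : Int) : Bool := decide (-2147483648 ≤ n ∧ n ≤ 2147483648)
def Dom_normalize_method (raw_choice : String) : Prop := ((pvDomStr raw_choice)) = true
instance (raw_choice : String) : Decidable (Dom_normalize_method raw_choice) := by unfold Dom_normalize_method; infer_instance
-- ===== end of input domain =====

-- B replaces A's per-call scan of ALIAS_MAP with a reverse lookup dict built once (first-wins), for an idiomatic single .get().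


-- ===== PORT A =====
def pvAliasMap : List (String × List String) :=
  [("tcp", ["tcp", "tcpbypass", "tcp-bypass", "tcp_bypass", "tcpbyp", "tcpbypass", "tlsvip"]),
   ("udp", ["udp", "udpbypass", "udp-bypass", "udp_bypass", "udp-ovh", "udpbypss", "udpovh"]),
   ("syn", ["syn", "synflood", "syn-flood"]),
   ("curl", ["curl", "http", "http-get", "curlget", "Skycurl"])]

-- A's for-loop over ALIAS_MAP.items() with early return
def pvScan (c : String) : List (String × List String) → Option String
  | [] => none
  | (canonical, aliases) :: rest =>
      if (aliases.map PySem.Str.lower).contains c then some canonical else pvScan c rest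

def normalize_method (raw_choice : String) : Option String :=
  let c := PySem.Str.lower (PySem.Str.strip raw_choice)
  pvScan c pvAliasMap

-- ===== PORT B =====
-- the module-level reverse dict built with setdefault (first-wins)
def pvReverse : PySem.Dict String String :=
  pvAliasMap.foldl
    (fun d p =>
      p.2.foldl
        (fun d a =>
          if d.contains (PySem.Str.lower a) then d else d.insert (PySem.Str.lower a) p.1)
        d)
    PySem.Dict.empty

def normalize_method_alt (raw_choice : String) : Option String :=
  pvReverse.get? (PySem.Str.lower (PySem.Str.strip raw_choice))

-- ===== PRECONDITION & SPEC =====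
def Spec_normalize_method (raw_choice : String) (out : Option String) : Prop := out = normalize_method_alt raw_choice
instance (raw_choice : String) (out : Option String) : Decidable (Spec_normalize_method raw_choice out) := by unfold Spec_normalize_method; infer_instance

-- ===== CLAIM (what is proved, stated in full; the proofs are below) =====
def Claim_equal_normalize_method : Prop := ∀ (raw_choice : String), Dom_normalize_method raw_choice → Spec_normalize_method raw_choice (normalize_method raw_choice)

-- ===== LEMMAS AND PROOFS =====
set_option maxHeartbeats 2000000 in
lemma pvReverse_eq : pvReverse = PySem.Dict.mk [("tcp", "tcp"), ("tcpbypass", "tcp"), ("tcp-bypass", "tcp"), ("tcp_bypass", "tcp"), ("tcpbyp", "tcp"), ("tlsvip", "tcp"), ("udp", "udp"), ("udpbypass", "udp"), ("udp-bypass", "udp"), ("udp_bypass", "udp"), ("udp-ovh", "udp"), ("udpbypss", "udp"), ("udpovh", "udp"), ("syn", "syn"), ("synflood", "syn"), ("syn-flood", "syn"), ("curl", "curl"), ("http", "curl"), ("http-get", "curl"), ("curlget", "curl"), ("skycurl", "curl")] := by rfl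

set_option maxHeartbeats 4000000 in
lemma pv_core (c : String) : pvScan c pvAliasMap = pvReverse.get? c := by
  have m1 : List.map PySem.Str.lower ["tcp", "tcpbypass", "tcp-bypass", "tcp_bypass", "tcpbyp", "tcpbypass", "tlsvip"] = ["tcp", "tcpbypass", "tcp-bypass", "tcp_bypass", "tcpbyp", "tcpbypass", "tlsvip"] := by rfl
  have m2 : List.map PySem.Str.lower ["udp", "udpbypass", "udp-bypass", "udp_bypass", "udp-ovh", "udpbypss", "udpovh"] = ["udp", "udpbypass", "udp-bypass", "udp_bypass", "udp-ovh", "udpbypss", "udpovh"] := by rfl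
  have m3 : List.map PySem.Str.lower ["syn", "synflood", "syn-flood"] = ["syn", "synflood", "syn-flood"] := by rfl
  have m4 : List.map PySem.Str.lower ["curl", "http", "http-get", "curlget", "Skycurl"] = ["curl", "http", "http-get", "curlget", "skycurl"] := by rfl
  rw [pvReverse_eq]
  simp only [pvScan, pvAliasMap, m1, m2, m3, m4, PySem.Dict.get?_mk_cons]
  by_cases h0 : c = "tcp"
  · simp [h0]
  by_cases h1 : c = "tcpbypass"
  · simp [h1]
  by_cases h2 : c = "tcp-bypass"
  · simp [h2]
  by_cases h3 : c = "tcp_bypass"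
  · simp [h3]
  by_cases h4 : c = "tcpbyp"
  · simp [h4]
  by_cases h5 : c = "tlsvip"
  · simp [h5]
  by_cases h6 : c = "udp"
  · simp [h6]
  by_cases h7 : c = "udpbypass"
  · simp [h7]
  by_cases h8 : c = "udp-bypass"
  · simp [h8]
  by_cases h9 : c = "udp_bypass"
  · simp [h9]
  by_cases h10 : c = "udp-ovh"
  · simp [h10]
  by_cases h11 : c = "udpbypss"
  · simp [h11]
  by_cases h12 : c = "udpovh"
  · simp [h12]
  by_cases h13 : c = "syn"
  · simp [h13]
  by_cases h14 : c = "synflood"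
  · simp [h14]
  by_cases h15 : c = "syn-flood"
  · simp [h15]
  by_cases h16 : c = "curl"
  · simp [h16]
  by_cases h17 : c = "http"
  · simp [h17]
  by_cases h18 : c = "http-get"
  · simp [h18]
  by_cases h19 : c = "curlget"
  · simp [h19]
  by_cases h20 : c = "skycurl"
  · simp [h20]
  simp [h0, h1, h2, h3, h4, h5, h6, h7, h8, h9, h10, h11, h12, h13, h14, h15, h16, h17, h18, h19, h20, Ne.symm h0, Ne.symm h1, Ne.symm h2, Ne.symm h3, Ne.symm h4, Ne.symm h5, Ne.symm h6, Ne.symm h7, Ne.symm h8, Ne.symm h9, Ne.symm h10, Ne.symm h11, Ne.symm h12, Ne.symm h13, Ne.symm h14, Ne.symm h15, Ne.symm h16, Ne.symm h17, Ne.symm h18, Ne.symm h19, Ne.symm h20, PySem.Dict.get?]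

-- ===== VERDICT (by name: the statement is the Claim_ definition above) =====
theorem normalize_method_spec : Claim_equal_normalize_method := by
  intro raw _
  unfold Spec_normalize_method normalize_method normalize_method_alt
  exact pv_core _
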